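-- pv_equiv track=rewrite | github.com/nicholasvenditti/IDLE | Reconnaissance.py | type_of_counter
-- ===== SOURCE A (Python) =====
-- def type_of_counter(id_values):
--
--     zero = True
--     incremental = True
--
--     for i in range(0, len(id_values) - 1):
--
--         for j in range(i + 1, len(id_values)):
--
--             if id_values[i] == id_values[j]:
--                 zero = zero and True
--                 incremental = False
--             elif id_values[i] < id_values[j]:
--                 incremental = incremental and True
--                 zero = False
--             else:
--                 zero = False
--                 incremental = False
--
--     if zero:
--         return "zero"
--     elif incremental:
--         return "incremental"
--     else:
--         return "random"
-- ===== SOURCE B (Python) =====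
-- def type_of_counter(id_values):
--     pairs = list(zip(id_values, id_values[1:]))
--     if all(a == b for a, b in pairs):
--         return "zero"
--     if all(a < b for a, b in pairs):
--         return "incremental"
--     return "random"
-- ===== Notes on version B (the rewrite author's own statement) =====
-- stated objective: faster
-- what changed: Replaced the all-pairs double loop with a single pass over adjacent pairs: all-adjacent-equal means 'zero' and adjacent strictly increasing means 'incremental' (equality and < are transitive, so adjacent checks decide the all-pairs properties).
import Mathlib
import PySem

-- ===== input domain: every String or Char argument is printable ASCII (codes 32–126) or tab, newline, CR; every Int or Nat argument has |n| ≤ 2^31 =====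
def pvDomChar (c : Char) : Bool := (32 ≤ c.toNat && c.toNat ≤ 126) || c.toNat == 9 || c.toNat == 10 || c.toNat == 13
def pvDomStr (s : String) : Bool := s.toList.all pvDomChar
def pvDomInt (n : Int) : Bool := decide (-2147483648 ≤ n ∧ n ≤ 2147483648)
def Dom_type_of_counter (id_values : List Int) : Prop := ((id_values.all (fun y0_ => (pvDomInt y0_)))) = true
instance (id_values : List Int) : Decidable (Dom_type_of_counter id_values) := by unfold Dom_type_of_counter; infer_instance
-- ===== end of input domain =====

-- B replaces A's all-pairs double loop by one pass over adjacent pairs (objective: faster, asymptotic).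

-- ===== PORT A =====
-- Literal port of A's nested loops: state (zero, incremental), both index ranges,
-- branches in the same order.  Indices produced by the ranges are always in bounds,
-- so pyGetD with default 0 is exact.
def type_of_counter (id_values : List Int) : String :=
  let n : Int := PySem.List.len id_values
  let st : Bool × Bool :=
    (PySem.List.pyRange 0 (n - 1)).foldl
      (fun st i =>
        (PySem.List.pyRange (i + 1) n).foldl
          (fun st j =>
            if PySem.List.pyGetD id_values i 0 == PySem.List.pyGetD id_values j 0 then
              (st.1 && true, false)
            else if PySem.List.pyGetD id_values i 0 < PySem.List.pyGetD id_values j 0 then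
              (false, st.2 && true)
            else
              (false, false))
          st)
      (true, true)
  if st.1 then "zero" else if st.2 then "incremental" else "random"

-- ===== PORT B =====
-- Port of Source B: pairs = zip(id_values, id_values[1:]) (xs[1:] = xs.drop 1), then two all() passes.
def type_of_counter_alt (id_values : List Int) : String :=
  let pairs := List.zip id_values (id_values.drop 1)
  if pairs.all (fun p => p.1 == p.2) then "zero"
  else if pairs.all (fun p => decide (p.1 < p.2)) then "incremental"
  else "random"

-- ===== PRECONDITION & SPEC =====
def Spec_type_of_counter (id_values : List Int) (out : String) : Prop := out = type_of_counter_alt id_values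
instance (id_values : List Int) (out : String) : Decidable (Spec_type_of_counter id_values out) := by unfold Spec_type_of_counter; infer_instance

-- ===== CLAIM (what is proved, stated in full; the proofs are below) =====
def Claim_equal_type_of_counter : Prop := ∀ (id_values : List Int), Dom_type_of_counter id_values → Spec_type_of_counter id_values (type_of_counter id_values)

-- ===== LEMMAS AND PROOFS =====

-- A's branch cascade is, on both components, an `&&` with the pair's test.
theorem pv_step_eq (a b : Int) (st : Bool × Bool) :
    (if a == b then (st.1 && true, false)
     else if a < b then (false, st.2 && true)
     else ((false : Bool), (false : Bool)))
    = (st.1 && (a == b), st.2 && decide (a < b)) := by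
  by_cases h : a = b
  · simp [h]
  · have hne : (a == b) = false := by simp [h]
    by_cases hlt : a < b <;> simp [hne, hlt]

-- folding an `&&`-accumulating pair step is `all` on each component
theorem pv_foldl_pair (f g : Int → Bool) (l : List Int) (st : Bool × Bool) :
    l.foldl (fun st j => (st.1 && f j, st.2 && g j)) st
      = (st.1 && l.all f, st.2 && l.all g) := by
  induction l generalizing st with
  | nil => simp
  | cons x t ih => simp [ih, Bool.and_assoc]

-- A's double index loop tests exactly all index pairs i < j
theorem pv_allPairs_iff (r : Int → Int → Bool) (xs : List Int) :
    ((PySem.List.pyRange 0 ((xs.length : Int) - 1)).all fun i =>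
      (PySem.List.pyRange (i + 1) (xs.length : Int)).all fun j =>
        r (PySem.List.pyGetD xs i 0) (PySem.List.pyGetD xs j 0)) = true
    ↔ List.Pairwise (fun a b => r a b = true) xs := by
  simp only [List.all_eq_true, PySem.List.mem_pyRange_one, List.pairwise_iff_getElem]
  constructor
  · intro h i j hi hj hij
    have h' := h (i : Int) ⟨by omega, by omega⟩ (j : Int) ⟨by omega, by omega⟩
    rw [PySem.List.pyGetD_eq_getElem xs 0 (by omega) (by omega),
        PySem.List.pyGetD_eq_getElem xs 0 (by omega) (by omega)] at h'
    simpa using h'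
  · intro h i hi j hj
    rw [PySem.List.pyGetD_eq_getElem xs 0 (by omega) (by omega),
        PySem.List.pyGetD_eq_getElem xs 0 (by omega) (by omega)]
    exact h i.toNat j.toNat (by omega) (by omega) (by omega)

-- B's pass over adjacent pairs is the chain of the relation
theorem pv_zip_all_iff (r : Int → Int → Bool) (xs : List Int) :
    ((List.zip xs (xs.drop 1)).all fun p => r p.1 p.2) = true
    ↔ List.IsChain (fun a b => r a b = true) xs := by
  induction xs with
  | nil => simp
  | cons a t ih =>
    cases t with
    | nil => simp
    | cons b u =>
      simp only [List.drop_one, List.tail_cons, List.zip_cons_cons, List.all_cons,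
        List.isChain_cons_cons, Bool.and_eq_true] at ih ⊢
      rw [ih]

theorem pv_pairwise_iff_zip (r : Int → Int → Bool)
    (tr : ∀ {a b c : Int}, r a b = true → r b c = true → r a c = true) (xs : List Int) :
    List.Pairwise (fun a b => r a b = true) xs
    ↔ ((List.zip xs (xs.drop 1)).all fun p => r p.1 p.2) = true := by
  haveI : Trans (fun a b => r a b = true) (fun a b => r a b = true)
      (fun a b => r a b = true) := ⟨fun h1 h2 => tr h1 h2⟩
  rw [pv_zip_all_iff, List.isChain_iff_pairwise]

-- ===== VERDICT (by name: the statement is the Claim_ definition above) =====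
theorem type_of_counter_spec : Claim_equal_type_of_counter := by
  intro xs _
  unfold Spec_type_of_counter type_of_counter type_of_counter_alt
  have hlen : PySem.List.len xs = (xs.length : Int) := rfl
  -- collapse A's nested folds to two `all`s over index pairs
  have hstep : ∀ (i : Int) (st : Bool × Bool),
      (PySem.List.pyRange (i + 1) (xs.length : Int)).foldl
        (fun st j =>
          if PySem.List.pyGetD xs i 0 == PySem.List.pyGetD xs j 0 then (st.1 && true, false)
          else if PySem.List.pyGetD xs i 0 < PySem.List.pyGetD xs j 0 then (false, st.2 && true)
          else (false, false)) st
      = (st.1 && (PySem.List.pyRange (i + 1) (xs.length : Int)).all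
            (fun j => PySem.List.pyGetD xs i 0 == PySem.List.pyGetD xs j 0),
         st.2 && (PySem.List.pyRange (i + 1) (xs.length : Int)).all
            (fun j => decide (PySem.List.pyGetD xs i 0 < PySem.List.pyGetD xs j 0))) := by
    intro i st
    have : (fun (st : Bool × Bool) (j : Int) =>
        if PySem.List.pyGetD xs i 0 == PySem.List.pyGetD xs j 0 then (st.1 && true, false)
        else if PySem.List.pyGetD xs i 0 < PySem.List.pyGetD xs j 0 then (false, st.2 && true)
        else (false, false))
        = (fun st j => (st.1 && (PySem.List.pyGetD xs i 0 == PySem.List.pyGetD xs j 0),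
                        st.2 && decide (PySem.List.pyGetD xs i 0 < PySem.List.pyGetD xs j 0))) := by
      funext st j; exact pv_step_eq _ _ st
    rw [this, pv_foldl_pair]
  simp only [hlen]
  rw [show (fun (st : Bool × Bool) (i : Int) =>
        (PySem.List.pyRange (i + 1) (xs.length : Int)).foldl
          (fun st j =>
            if PySem.List.pyGetD xs i 0 == PySem.List.pyGetD xs j 0 then (st.1 && true, false)
            else if PySem.List.pyGetD xs i 0 < PySem.List.pyGetD xs j 0 then (false, st.2 && true)
            else (false, false)) st)
      = (fun st i => (st.1 && (PySem.List.pyRange (i + 1) (xs.length : Int)).all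
            (fun j => PySem.List.pyGetD xs i 0 == PySem.List.pyGetD xs j 0),
         st.2 && (PySem.List.pyRange (i + 1) (xs.length : Int)).all
            (fun j => decide (PySem.List.pyGetD xs i 0 < PySem.List.pyGetD xs j 0))))
    from funext fun st => funext fun i => hstep i st, pv_foldl_pair]
  simp only [Bool.true_and]
  -- identify the two flags with B's two adjacent-pair passes
  have hE : ((PySem.List.pyRange 0 ((xs.length : Int) - 1)).all fun i =>
      (PySem.List.pyRange (i + 1) (xs.length : Int)).all fun j =>
        PySem.List.pyGetD xs i 0 == PySem.List.pyGetD xs j 0)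
      = ((List.zip xs (xs.drop 1)).all fun p => p.1 == p.2) := by
    rw [Bool.eq_iff_iff, pv_allPairs_iff (fun a b => a == b),
      pv_pairwise_iff_zip (fun a b => a == b)
        (fun h1 h2 => by simp_all)]
  have hL : ((PySem.List.pyRange 0 ((xs.length : Int) - 1)).all fun i =>
      (PySem.List.pyRange (i + 1) (xs.length : Int)).all fun j =>
        decide (PySem.List.pyGetD xs i 0 < PySem.List.pyGetD xs j 0))
      = ((List.zip xs (xs.drop 1)).all fun p => decide (p.1 < p.2)) := by
    rw [Bool.eq_iff_iff, pv_allPairs_iff (fun a b => decide (a < b)),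
      pv_pairwise_iff_zip (fun a b => decide (a < b))
        (fun h1 h2 => by simp_all; omega)]
  rw [hE, hL]
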